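-- pv_equiv track=rewrite | github.com/open-dicom/dicom_parser | src/dicom_parser/utils/sequence_detector/field_query.py | find_task_name
-- ===== SOURCE A (Python) =====
-- INVALID_CHARACTERS = "!@#$%^&*()_-+="
--
-- def strip_element(element: str) -> str:
--     """
--     strips element from BIDS-invalid characters
--     Parameters
--     ----------
--     element : str
--         String element intended for a BIDS specification
--
--     Returns
--     -------
--     str
--         The element stripped from invalid characters
--     """
--     for invalid_characted in INVALID_CHARACTERS:
--         element = element.replace(invalid_characted, "")
--     return element
--
-- def find_task_name(header: dict) -> str:
--     """
--     Finds correct value for the "task" field of BIDS specification for fMRI sequences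
--     Parameters
--     ----------
--     header : dict
--         Dictionary containing DICOM's header.
--
--     Returns
--     -------
--     str
--         The task's name.
--     """
--     description = header.get("SeriesDescription").lower()
--     if "rsf" in description:
--         task = "rest"
--     else:
--         task = "".join(
--             [strip_element(i).capitalize() for i in description.split("_")]
--         )
--     return task
-- ===== SOURCE B (Python) =====
-- INVALID_CHARACTERS = "!@#$%^&*()_-+="
--
--
-- def find_task_name(header: dict) -> str:
--     description = header.get("SeriesDescription").lower()
--     if "rsf" in description:
--         return "rest"
--     # single left-to-right pass: '_' starts a new token, invalid characters are
--     # dropped, the first kept character of each token is uppercased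
--     chars = []
--     first = True
--     for ch in description:
--         if ch == "_":
--             first = True
--         elif ch in INVALID_CHARACTERS:
--             continue
--         else:
--             chars.append(ch.upper() if first else ch)
--             first = False
--     return "".join(chars)
-- ===== Notes on version B (the rewrite author's own statement) =====
-- stated objective: alternative
-- what changed: A splits on '_' and, per token, runs one full str.replace scan per invalid character (14 scans) before capitalizing and joining; B is a single-pass state machine over the description that drops invalid characters, tracks token starts, and uppercases the first kept character of each token.
import Mathlib
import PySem

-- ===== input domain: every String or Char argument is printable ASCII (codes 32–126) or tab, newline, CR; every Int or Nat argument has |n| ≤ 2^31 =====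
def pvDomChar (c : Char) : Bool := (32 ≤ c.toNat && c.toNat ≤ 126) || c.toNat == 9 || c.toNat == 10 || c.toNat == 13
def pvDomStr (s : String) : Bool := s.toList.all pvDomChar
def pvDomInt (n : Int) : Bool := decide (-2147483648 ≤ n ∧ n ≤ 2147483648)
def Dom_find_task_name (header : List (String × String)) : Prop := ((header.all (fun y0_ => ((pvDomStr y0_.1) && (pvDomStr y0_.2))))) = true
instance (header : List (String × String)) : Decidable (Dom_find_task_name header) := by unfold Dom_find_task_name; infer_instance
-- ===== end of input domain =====

-- B replaces A's per-token loop of 14 str.replace scans with a single-pass state machine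
-- over the description (alternative decomposition, same observable result).

-- ===== PORT A =====
def INVALID_CHARACTERS : String := "!@#$%^&*()_-+="

def strip_element (element : String) : String :=
  INVALID_CHARACTERS.toList.foldl
    (fun e c => PySem.Str.replace e (String.ofList [c]) "") element

-- str.capitalize(): first character title-cased, the rest lower-cased; exact on the
-- ASCII domain (title-case = upperChar there); hand port, no PySem primitive exists.
def pyCapitalize (s : String) : String :=
  match s.toList with
  | [] => s
  | c :: cs => String.ofList (PySem.Chars.upperChar c :: cs.map PySem.Chars.lowerChar)

def find_task_name (header : List (String × String)) : String :=
  match PySem.Dict.get? (PySem.Dict.ofList header) "SeriesDescription" with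
  | none => ""  -- Python: None.lower() raises AttributeError; excluded by Pre_
  | some v =>
    let description := PySem.Str.lower v
    if PySem.Str.isIn "rsf" description then "rest"
    else
      PySem.Str.join ""
        (((PySem.Str.split? description "_").getD []).map
          (fun i => pyCapitalize (strip_element i)))

-- ===== PORT B =====
def pvInvalidChars : List Char := "!@#$%^&*()_-+=".toList

def pvMachine : List Char → Bool → List Char
  | [], _ => []
  | c :: rest, first =>
    if c = '_' then pvMachine rest true
    else if pvInvalidChars.contains c then pvMachine rest first
    else (if first then PySem.Chars.upperChar c else c) :: pvMachine rest false

def find_task_name_alt (header : List (String × String)) : String :=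
  match PySem.Dict.get? (PySem.Dict.ofList header) "SeriesDescription" with
  | none => ""  -- Python: None.lower() raises AttributeError; excluded by Pre_
  | some v =>
    let description := PySem.Str.lower v
    if PySem.Str.isIn "rsf" description then "rest"
    else String.ofList (pvMachine description.toList true)

-- ===== PRECONDITION & SPEC =====
-- Pre_ excludes only the headers without a "SeriesDescription" key, on which
-- Python A raises AttributeError (None.lower()).
def Pre_find_task_name (header : List (String × String)) : Prop :=
  "SeriesDescription" ∈ header.map Prod.fst
instance (header : List (String × String)) : Decidable (Pre_find_task_name header) := by
  unfold Pre_find_task_name; infer_instance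

def pvWitness_find_task_name : (List (String × String)) :=
  [("SeriesDescription", "bold_task-nback_run-1")]

def Spec_find_task_name (header : List (String × String)) (out : String) : Prop :=
  out = find_task_name_alt header
instance (header : List (String × String)) (out : String) : Decidable (Spec_find_task_name header out) := by
  unfold Spec_find_task_name; infer_instance

-- ===== CLAIM (what is proved, stated in full; the proofs are below) =====
def Claim_equal_find_task_name : Prop :=
  ∀ (header : List (String × String)), Dom_find_task_name header →
    Pre_find_task_name header → Spec_find_task_name header (find_task_name header)

-- ===== LEMMAS AND PROOFS =====

theorem pv_char_le_iff (a b : Char) : a ≤ b ↔ a.toNat ≤ b.toNat := by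
  rw [Char.le_def, UInt32.le_iff_toNat_le]; rfl

theorem pv_lowerChar_idem (c : Char) :
    PySem.Chars.lowerChar (PySem.Chars.lowerChar c) = PySem.Chars.lowerChar c := by
  unfold PySem.Chars.lowerChar PySem.Chars.isupper
  split
  · rename_i h
    simp only [Bool.and_eq_true, decide_eq_true_eq, pv_char_le_iff] at h
    have hA : ('A' : Char).toNat = 65 := by decide
    have hZ : ('Z' : Char).toNat = 90 := by decide
    rw [hA, hZ] at h
    have hv : Nat.isValidChar (c.toNat + 32) := Or.inl (by omega)
    have ht : (Char.ofNat (c.toNat + 32)).toNat = c.toNat + 32 := by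
      rw [Char.toNat_ofNat, if_pos hv]
    have hfalse : (decide ('A' ≤ Char.ofNat (c.toNat + 32)) &&
        decide (Char.ofNat (c.toNat + 32) ≤ 'Z')) = false := by
      simp only [Bool.and_eq_false_iff, decide_eq_false_iff_not, pv_char_le_iff, ht, hA, hZ]
      omega
    simp [hfalse]
  · rfl

-- the filtered token ("stripped from invalid characters")
def pvFilt (cs : List Char) : List Char :=
  cs.filter (fun c => !pvInvalidChars.contains c)

-- list-level capitalize
def pvCapL : List Char → List Char
  | [] => []
  | c :: cs => PySem.Chars.upperChar c :: cs.map PySem.Chars.lowerChar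

def pvCapFilt (cs : List Char) : List Char := pvCapL (pvFilt cs)

-- split at '_' as (first token, remaining tokens)
def pvSplitTok : List Char → List Char × List (List Char)
  | [] => ([], [])
  | c :: t =>
    let p := pvSplitTok t
    if c = '_' then ([], p.1 :: p.2) else (c :: p.1, p.2)

theorem pv_mem_splitTok_fst : ∀ (l : List Char) (a : Char), a ∈ (pvSplitTok l).1 → a ∈ l := by
  intro l
  induction l with
  | nil => intro a h; simp [pvSplitTok] at h
  | cons c t ih =>
    intro a h
    by_cases hc : c = '_'
    · simp [pvSplitTok, hc] at h
    · simp only [pvSplitTok, if_neg hc, List.mem_cons] at h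
      rcases h with h | h
      · simp [h]
      · exact List.mem_cons_of_mem _ (ih a h)

theorem pv_replace_go_filter (c : Char) :
    ∀ (fuel : ℕ) (l acc : List Char), l.length ≤ fuel →
      PySem.Chars.replace.go [c] [] fuel l acc
        = acc.reverse ++ l.filter (fun x => !(x == c)) := by
  intro fuel
  induction fuel with
  | zero =>
    intro l acc h
    have : l = [] := List.length_eq_zero_iff.mp (Nat.le_zero.mp h)
    subst this
    simp [PySem.Chars.replace.go]
  | succ n ih =>
    intro l acc h
    cases l with
    | nil => simp [PySem.Chars.replace.go]
    | cons x t =>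
      have hpre : List.isPrefixOf [c] (x :: t) = (c == x) := by
        simp [List.isPrefixOf]
      rw [List.length_cons] at h
      by_cases hx : c = x
      · have hp : List.isPrefixOf [c] (x :: t) = true := by simp [hpre, hx]
        simp only [PySem.Chars.replace.go, hp, if_true, List.length_singleton,
          List.drop_succ_cons, List.drop_zero, List.reverse_nil, List.nil_append]
        rw [ih t acc (by omega)]
        simp [List.filter_cons, hx]
      · have hp : List.isPrefixOf [c] (x :: t) = false := by simp [hpre, hx]
        simp only [PySem.Chars.replace.go, hp, Bool.false_eq_true, if_false]
        rw [ih t (x :: acc) (by omega)]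
        have hxc : (x == c) = false := by simp; exact fun e => hx e.symm
        simp [List.filter_cons, hxc]

theorem pv_replace_single (s : String) (c : Char) :
    (PySem.Str.replace s (String.ofList [c]) "").toList
      = s.toList.filter (fun x => !(x == c)) := by
  have h1 : (String.ofList [c]).toList = [c] := String.toList_ofList
  simp only [PySem.Str.replace, String.toList_ofList, h1]
  have : PySem.Chars.replace s.toList [c] "".toList
      = PySem.Chars.replace.go [c] [] s.toList.length s.toList [] := by
    simp [PySem.Chars.replace]
  rw [this, pv_replace_go_filter c _ _ _ le_rfl]
  simp

theorem pv_foldl_replace_filter :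
    ∀ (cs : List Char) (s : String),
      (cs.foldl (fun e c => PySem.Str.replace e (String.ofList [c]) "") s).toList
        = s.toList.filter (fun x => !cs.contains x) := by
  intro cs
  induction cs with
  | nil => intro s; simp
  | cons c t ih =>
    intro s
    simp only [List.foldl_cons]
    rw [ih, pv_replace_single, List.filter_filter]
    apply List.filter_congr
    intro x _
    by_cases hxc : x = c <;> simp [List.contains_cons, hxc, Bool.and_comm]

theorem pv_strip_toList (s : String) :
    (strip_element s).toList = pvFilt s.toList := by
  unfold strip_element pvFilt
  rw [pv_foldl_replace_filter]
  rfl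

theorem pv_capitalize_toList (s : String) :
    (pyCapitalize s).toList = pvCapL s.toList := by
  cases h : s.toList with
  | nil => simp [pyCapitalize, h, pvCapL]
  | cons c cs => simp [pyCapitalize, h, pvCapL]

theorem pv_splitOn_go (fuel : ℕ) :
    ∀ (l cur : List Char) (accl : List (List Char)), l.length ≤ fuel →
      PySem.Chars.splitOn.go ['_'] fuel l cur accl
        = accl.reverse ++ (cur.reverse ++ (pvSplitTok l).1) :: (pvSplitTok l).2 := by
  induction fuel with
  | zero =>
    intro l cur accl h
    have : l = [] := List.length_eq_zero_iff.mp (Nat.le_zero.mp h)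
    subst this
    simp [PySem.Chars.splitOn.go, pvSplitTok]
  | succ n ih =>
    intro l cur accl h
    cases l with
    | nil => simp [PySem.Chars.splitOn.go, pvSplitTok]
    | cons x t =>
      have hpre : List.isPrefixOf ['_'] (x :: t) = ('_' == x) := by
        simp [List.isPrefixOf]
      rw [List.length_cons] at h
      by_cases hx : x = '_'
      · have hp : List.isPrefixOf ['_'] (x :: t) = true := by simp [hx]
        simp only [PySem.Chars.splitOn.go, hp, if_pos]
        rw [show List.drop (['_'].length) (x :: t) = t by simp]
        rw [ih t [] (cur.reverse :: accl) (by omega)]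
        simp [pvSplitTok, hx]
      · have hp : List.isPrefixOf ['_'] (x :: t) = false := by
          simp [hpre]; exact fun e => hx e.symm
        simp only [PySem.Chars.splitOn.go, hp, Bool.false_eq_true, if_neg, not_false_iff]
        rw [ih t (x :: cur) accl (by omega)]
        simp [pvSplitTok, hx]

theorem pv_splitOn_eq (l : List Char) :
    PySem.Chars.splitOn l ['_'] = (pvSplitTok l).1 :: (pvSplitTok l).2 := by
  unfold PySem.Chars.splitOn
  rw [pv_splitOn_go (l.length + 1) l [] [] (by omega)]
  simp

theorem pv_join_empty : ∀ (parts : List (List Char)),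
    PySem.Chars.join [] parts = parts.flatten := by
  intro parts
  induction parts with
  | nil => simp [PySem.Chars.join_nil]
  | cons a t ih =>
    cases t with
    | nil => simp [PySem.Chars.join, List.intercalate]
    | cons b t' =>
      simp only [PySem.Chars.join, List.intercalate] at ih ⊢
      simp only [List.intersperse_cons₂, List.flatten_cons] at ih ⊢
      simp [ih]

theorem pv_filt_map_fix (l : List Char) (h : ∀ x ∈ l, PySem.Chars.lowerChar x = x) :
    (pvFilt l).map PySem.Chars.lowerChar = pvFilt l := by
  rw [List.map_congr_left (g := id), List.map_id]
  intro a ha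
  exact h a (List.mem_of_mem_filter ha)

theorem pv_machine_split :
    ∀ (ds : List Char), (∀ c ∈ ds, PySem.Chars.lowerChar c = c) →
      pvMachine ds true
          = pvCapFilt (pvSplitTok ds).1 ++ ((pvSplitTok ds).2.map pvCapFilt).flatten
      ∧ pvMachine ds false
          = pvFilt (pvSplitTok ds).1 ++ ((pvSplitTok ds).2.map pvCapFilt).flatten := by
  intro ds
  induction ds with
  | nil => intro _; simp [pvMachine, pvSplitTok, pvCapFilt, pvFilt, pvCapL]
  | cons c t ih =>
    intro H
    have Ht : ∀ x ∈ t, PySem.Chars.lowerChar x = x := fun x hx => H x (List.mem_cons_of_mem _ hx)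
    obtain ⟨ih1, ih2⟩ := ih Ht
    by_cases hc : c = '_'
    · subst hc
      constructor <;>
        simp [pvMachine, pvSplitTok, pvCapFilt, pvFilt, pvCapL, ih1]
    · by_cases hinv : c ∈ pvInvalidChars
      · have e2 : pvSplitTok (c :: t) = (c :: (pvSplitTok t).1, (pvSplitTok t).2) := by
          simp [pvSplitTok, hc]
        have e3 : pvFilt (c :: (pvSplitTok t).1) = pvFilt (pvSplitTok t).1 := by
          simp [pvFilt, hinv]
        constructor <;>
          · rw [e2]
            simp only [pvMachine, if_neg hc, pvCapFilt, e3, ih1, ih2]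
            simp [hinv]
      · have hfix : (pvFilt (pvSplitTok t).1).map PySem.Chars.lowerChar
            = pvFilt (pvSplitTok t).1 :=
          pv_filt_map_fix _ (fun x hx => Ht x (pv_mem_splitTok_fst t x hx))
        have e1t : pvMachine (c :: t) true = PySem.Chars.upperChar c :: pvMachine t false := by
          simp [pvMachine, hc, hinv]
        have e1f : pvMachine (c :: t) false = c :: pvMachine t false := by
          simp [pvMachine, hc, hinv]
        have e2 : pvSplitTok (c :: t) = (c :: (pvSplitTok t).1, (pvSplitTok t).2) := by
          simp [pvSplitTok, hc]
        have e3 : pvFilt (c :: (pvSplitTok t).1) = c :: pvFilt (pvSplitTok t).1 := by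
          simp [pvFilt, hinv]
        constructor
        · rw [e1t, e2, ih2]
          simp only [pvCapFilt, e3, pvCapL, hfix]
          simp
        · rw [e1f, e2, ih2]
          simp only [e3]
          simp

-- ===== VERDICT (by name: the statement is the Claim_ definition above) =====
theorem find_task_name_spec : Claim_equal_find_task_name := by
  intro header _ _
  unfold Spec_find_task_name find_task_name find_task_name_alt
  cases hget : PySem.Dict.get? (PySem.Dict.ofList header) "SeriesDescription" with
  | none => rfl
  | some v =>
    simp only
    by_cases hin : PySem.Str.isIn "rsf" (PySem.Str.lower v) = true
    · rw [if_pos hin, if_pos hin]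
    · rw [if_neg hin, if_neg hin]
      rw [← String.toList_inj]
      have hsplit : PySem.Str.split? (PySem.Str.lower v) "_"
          = some ((PySem.Chars.splitOn (PySem.Str.lower v).toList ['_']).map String.ofList) := by
        simp only [PySem.Str.split?, PySem.Chars.split?,
          show ("_" : String).toList = ['_'] from rfl, List.isEmpty_cons, Bool.false_eq_true,
          if_false, Option.map_some]
      rw [hsplit]
      simp only [Option.getD_some, PySem.Str.join, String.toList_ofList, List.map_map]
      have htok : ∀ t : List Char,
          (String.toList ∘ (fun i => pyCapitalize (strip_element i)) ∘ String.ofList) t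
            = pvCapFilt t := by
        intro t
        simp only [Function.comp_apply]
        rw [pv_capitalize_toList, pv_strip_toList]
        simp [pvCapFilt]
      rw [List.map_congr_left (fun t _ => htok t)]
      have hds : ∀ c ∈ (PySem.Str.lower v).toList, PySem.Chars.lowerChar c = c := by
        intro c hc
        rw [PySem.Str.toList_lower, PySem.Chars.lower] at hc
        obtain ⟨a, _, rfl⟩ := List.mem_map.mp hc
        exact pv_lowerChar_idem a
      obtain ⟨h1, _⟩ := pv_machine_split (PySem.Str.lower v).toList hds
      rw [pv_splitOn_eq, show ("" : String).toList = ([] : List Char) from rfl, pv_join_empty]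
      simp only [List.map_cons, List.flatten_cons]
      exact h1.symm
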